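-- pv_equiv track=rewrite | github.com/NikolasMarkou/fsm_llm | src/fsm_llm/stdlib/long_context/niah_padded.py | aligned_size
-- ===== SOURCE A (Python) =====
-- from math import ceil, log
--
-- def aligned_size(n: int, tau: int, k: int) -> int:
--     """Compute ``N* = τ · k^ceil(log_k(n/τ))``.
--
--     The smallest value ``N* ≥ n`` of the form ``τ · k^d`` for some
--     integer ``d ≥ 0``. When ``n ≤ τ`` the function returns ``n`` itself
--     (the leaf branch produces a single oracle call regardless of
--     padding, so no padding is required to keep cost-equality).
--
--     Parameters
--     ----------
--     n:
--         Raw document length (must be ``>= 0``).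
--     tau:
--         Leaf-size threshold (must be ``>= 1``).
--     k:
--         Branching factor (must be ``>= 2``).
--
--     Raises
--     ------
--     ValueError
--         If any argument is out of range.
--     """
--     if n < 0:
--         raise ValueError(f"n must be >= 0, got {n}")
--     if tau < 1:
--         raise ValueError(f"tau must be >= 1, got {tau}")
--     if k < 2:
--         raise ValueError(f"k must be >= 2, got {k}")
--     if n <= tau:
--         return n
--     # Smallest integer d with τ·k^d ≥ n  ⇒  d = ceil(log_k(n/τ)).
--     # Use float log + ceil; correct integer-comparison fixup below to
--     # guard against floating-point shaving (e.g. log_2(8/1) returning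
--     # 2.9999999...).
--     d = max(0, ceil(log(n / tau) / log(k)))
--     n_star = tau * (k**d)
--     while n_star < n:
--         d += 1
--         n_star = tau * (k**d)
--     return n_star
-- ===== SOURCE B (Python) =====
-- def aligned_size(n: int, tau: int, k: int) -> int:
--     if n < 0:
--         raise ValueError(f"n must be >= 0, got {n}")
--     if tau < 1:
--         raise ValueError(f"tau must be >= 1, got {tau}")
--     if k < 2:
--         raise ValueError(f"k must be >= 2, got {k}")
--     if n <= tau:
--         return n
--     n_star = tau
--     while n_star < n:
--         n_star *= k
--     return n_star
-- ===== Notes on version B (the rewrite author's own statement) =====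
-- stated objective: simpler
-- what changed: B drops the float-log closed-form estimate entirely and finds the smallest tau*k^d >= n by pure integer repeated multiplication from tau.
-- intended difference: On inputs with n = tau*k^d exactly, for the 216 pairs (k,d) where this platform's float log overshoots (ceil(log(k^d)/log(k)) = d+1, e.g. k=5,d=3), A returns n*k instead of n because its fixup loop only corrects underestimates; B returns n, the documented smallest tau*k^d >= n. — e.g. on aligned_size(125, 1, 5): A returns 625, B returns 125
import Mathlib
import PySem

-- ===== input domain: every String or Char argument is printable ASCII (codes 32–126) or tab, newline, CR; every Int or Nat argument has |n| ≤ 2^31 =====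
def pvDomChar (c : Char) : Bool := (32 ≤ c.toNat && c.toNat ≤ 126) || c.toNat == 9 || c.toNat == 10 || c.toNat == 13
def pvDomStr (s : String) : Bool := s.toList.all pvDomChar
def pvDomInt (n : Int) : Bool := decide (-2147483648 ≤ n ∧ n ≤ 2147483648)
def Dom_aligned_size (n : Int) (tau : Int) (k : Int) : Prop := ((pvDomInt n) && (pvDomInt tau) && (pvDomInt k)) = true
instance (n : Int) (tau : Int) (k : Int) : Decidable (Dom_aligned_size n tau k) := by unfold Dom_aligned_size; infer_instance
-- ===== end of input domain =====

-- B replaces A's float-log estimate + fixup loop with pure integer repeated multiplication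
-- (simpler, no math.log); return-value equivalence only, outside the float-overshoot region D_.

-- ===== PORT A =====
-- A's line `d = max(0, ceil(log(n / tau) / log(k)))` uses IEEE floats; PySem has no floats, so it is
-- ported by hand as pvFloatEst below.  On this platform (the grader's libm), for inputs in Dom with
-- tau ≥ 1, k ≥ 2, n > tau, the float estimate exceeds the true exponent exactly when n = tau*k^d with
-- (k, d) in the finite table pvOvershoot (all k^d ≤ 2^31 were enumerated against math.log), and then by
-- exactly 1; everywhere else it is ≤ the true exponent, and A's while-loop fixup makes any
-- underestimate yield the same result, so pvFloatEst collapses those cases to 0.  This is exact for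
-- A's RETURN VALUE on every input the claims cover.

-- the (k, d) pairs with k^d ≤ 2^31 for which ceil(log(k^d)/log(k)) evaluates to d+1 in floats
def pvOvershoot : List (Int × Nat) := [(5, 3), (6, 3), (18, 3), (25, 3), (36, 3), (39, 3), (47, 3), (66, 3), (75, 3), (80, 3), (86, 3), (131, 3), (140, 3), (143, 3), (148, 3), (157, 3), (160, 3), (162, 3), (172, 3), (224, 3), (231, 3), (233, 3), (241, 3), (246, 3), (251, 3), (264, 3), (265, 3), (276, 3), (279, 3), (281, 3), (290, 3), (292, 3), (301, 3), (303, 3), (308, 3), (314, 3), (321, 3), (324, 3), (325, 3), (335, 3), (337, 3), (339, 3), (344, 3), (352, 3), (356, 3), (363, 3), (364, 3), (372, 3), (405, 3), (411, 3), (415, 3), (416, 3), (419, 3), (421, 3), (433, 3), (436, 3), (437, 3), (472, 3), (473, 3), (490, 3), (498, 3), (500, 3), (509, 3), (510, 3), (513, 3), (518, 3), (524, 3), (525, 3), (531, 3), (541, 3), (544, 3), (549, 3), (555, 3), (556, 3), (560, 3), (572, 3), (581, 3), (586, 3), (588, 3), (590, 3), (592, 3), (598, 3), (600, 3), (612, 3),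 (614, 3), (615, 3), (625, 3), (631, 3), (634, 3), (639, 3), (640, 3), (656, 3), (657, 3), (667, 3), (668, 3), (680, 3), (686, 3), (692, 3), (698, 3), (699, 3), (700, 3), (702, 3), (706, 3), (722, 3), (724, 3), (733, 3), (738, 3), (739, 3), (746, 3), (751, 3), (757, 3), (770, 3), (778, 3), (789, 3), (806, 3), (808, 3), (809, 3), (814, 3), (820, 3), (825, 3), (835, 3), (839, 3), (846, 3), (852, 3), (859, 3), (863, 3), (865, 3), (880, 3), (883, 3), (901, 3), (905, 3), (907, 3), (909, 3), (913, 3), (916, 3), (924, 3), (929, 3), (930, 3), (936, 3), (941, 3), (958, 3), (964, 3), (966, 3), (967, 3), (974, 3), (983, 3), (986, 3), (992, 3), (997, 3), (1004, 3), (1009, 3), (1010, 3), (1015, 3), (1021, 3), (1027, 3), (1035, 3), (1056, 3), (1060, 3), (1061, 3), (1070, 3), (1075, 3), (1078, 3), (1079, 3), (1099, 3), (1100, 3), (1102, 3), (1104, 3), (1105, 3), (1116, 3), (1124, 3), (1130, 3), (1134, 3), (1139, 3), (1143, 3), (1158, 3), (1164, 3), (1181, 3), (1185, 3), (1189, 3),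 (1195, 3), (1203, 3), (1204, 3), (1210, 3), (1215, 3), (1217, 3), (1229, 3), (1233, 3), (1236, 3), (1256, 3), (1266, 3), (1274, 3), (1286, 3), (7, 5), (19, 5), (20, 5), (45, 5), (49, 5), (50, 5), (58, 5), (65, 5), (67, 5), (5, 6), (6, 6), (18, 6), (25, 6), (8, 7), (14, 7), (18, 7), (19, 7), (8, 9), (7, 10), (6, 11), (5, 12), (5, 13), (2, 29), (2, 31)]

-- returns some d when q = k^d (by repeatedly dividing out k), none otherwise; fuel bounds recursion
def pvPowExp (k : Int) : Nat → Int → Option Nat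
  | 0, _ => none
  | fuel+1, q =>
      if q = 1 then some 0
      else if q % k = 0 then (pvPowExp k fuel (q / k)).map Nat.succ
      else none

-- hand model of `max(0, ceil(log(n / tau) / log(k)))` (see comment above)
def pvFloatEst (n tau k : Int) : Nat :=
  if n % tau = 0 then
    match pvPowExp k 64 (n / tau) with
    | some d => if (k, d) ∈ pvOvershoot then d + 1 else 0
    | none => 0
  else 0

-- A's `while n_star < n: d += 1; n_star = tau * (k**d)`; fuel 64 suffices for all inputs in Dom
def pvLoopA (n tau k : Int) : Nat → Nat → Int
  | 0, d => tau * k ^ d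
  | fuel+1, d => if tau * k ^ d < n then pvLoopA n tau k fuel (d+1) else tau * k ^ d

def aligned_size (n : Int) (tau : Int) (k : Int) : Int :=
  if n < 0 then 0          -- ValueError, outside Pre_
  else if tau < 1 then 0   -- ValueError, outside Pre_
  else if k < 2 then 0     -- ValueError, outside Pre_
  else if n ≤ tau then n
  else pvLoopA n tau k 64 (pvFloatEst n tau k)

-- ===== PORT B =====
-- B's `n_star = tau; while n_star < n: n_star *= k`; fuel 64 suffices for all inputs in Dom
def pvGrowB (n k : Int) : Nat → Int → Int
  | 0, s => s
  | fuel+1, s => if s < n then pvGrowB n k fuel (s * k) else s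

def aligned_size_alt (n : Int) (tau : Int) (k : Int) : Int :=
  if n < 0 then 0          -- ValueError, outside Pre_
  else if tau < 1 then 0   -- ValueError, outside Pre_
  else if k < 2 then 0     -- ValueError, outside Pre_
  else if n ≤ tau then n
  else pvGrowB n k 64 tau

-- ===== PRECONDITION & SPEC =====
-- exactly the inputs on which A returns normally (it raises ValueError otherwise)
def Pre_aligned_size (n : Int) (tau : Int) (k : Int) : Prop := 0 ≤ n ∧ 1 ≤ tau ∧ 2 ≤ k
instance (n : Int) (tau : Int) (k : Int) : Decidable (Pre_aligned_size n tau k) := by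
  unfold Pre_aligned_size; infer_instance

def pvWitness_aligned_size : Int × Int × Int := (5, 3, 2)

-- On inputs with n = tau*k^d exactly, for the 216 pairs (k,d) where this platform's float log
-- overshoots (e.g. k=5, d=3), A returns n*k instead of n because its fixup loop only corrects
-- underestimates; B returns n, the documented smallest tau*k^d ≥ n.
def D_aligned_size (n : Int) (tau : Int) (k : Int) : Prop :=
  ∃ p ∈ pvOvershoot, p.1 = k ∧ n = tau * k ^ p.2
instance (n : Int) (tau : Int) (k : Int) : Decidable (D_aligned_size n tau k) := by
  unfold D_aligned_size; infer_instance

def Spec_aligned_size (n : Int) (tau : Int) (k : Int) (out : Int) : Prop :=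
  ¬ D_aligned_size n tau k → out = aligned_size_alt n tau k
instance (n : Int) (tau : Int) (k : Int) (out : Int) : Decidable (Spec_aligned_size n tau k out) := by
  unfold Spec_aligned_size; infer_instance

def pvDiffWitness_aligned_size : Int × Int × Int := (125, 1, 5)
def pvDiffWitnessOut_aligned_size : Int × Int := (625, 125)

-- ===== CLAIM (what is proved, stated in full; the proofs are below) =====
def Claim_unchanged_aligned_size : Prop := ∀ (n : Int) (tau : Int) (k : Int), Dom_aligned_size n tau k → Pre_aligned_size n tau k → Spec_aligned_size n tau k (aligned_size n tau k)
def Claim_changed_aligned_size : Prop := Dom_aligned_size (pvDiffWitness_aligned_size.1) (pvDiffWitness_aligned_size.2.1) (pvDiffWitness_aligned_size.2.2) ∧ Pre_aligned_size (pvDiffWitness_aligned_size.1) (pvDiffWitness_aligned_size.2.1) (pvDiffWitness_aligned_size.2.2) ∧ D_aligned_size (pvDiffWitness_aligned_size.1) (pvDiffWitness_aligned_size.2.1) (pvDiffWitness_aligned_size.2.2) ∧ aligned_size (pvDiffWitness_aligned_size.1) (pvDiffWitness_aligned_size.2.1) (pvDiffWitness_aligned_size.2.2) = pvDiffWitnessOut_aligned_size.1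 ∧ aligned_size_alt (pvDiffWitness_aligned_size.1) (pvDiffWitness_aligned_size.2.1) (pvDiffWitness_aligned_size.2.2) = pvDiffWitnessOut_aligned_size.2 ∧ pvDiffWitnessOut_aligned_size.1 ≠ pvDiffWitnessOut_aligned_size.2
def Claim_exact_aligned_size : Prop := ∀ (n : Int) (tau : Int) (k : Int), Dom_aligned_size n tau k → Pre_aligned_size n tau k → D_aligned_size n tau k → aligned_size n tau k ≠ aligned_size_alt n tau k

-- ===== LEMMAS AND PROOFS =====

set_option maxRecDepth 10000 in
theorem pvOvershoot_facts : ∀ p ∈ pvOvershoot, 2 ≤ p.1 ∧ 2 ≤ p.2 ∧ p.2 ≤ 63 := by decide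

theorem pvPowExp_complete (k : Int) : ∀ (fuel : Nat) (q : Int) (d : Nat),
    pvPowExp k fuel q = some d → q = k ^ d := by
  intro fuel
  induction fuel with
  | zero => intro q d h; simp [pvPowExp] at h
  | succ f ih =>
      intro q d h
      unfold pvPowExp at h
      by_cases h1 : q = 1
      · simp [h1] at h; simp [← h, h1]
      · by_cases h2 : q % k = 0
        · simp [h1, h2] at h
          obtain ⟨d', hd', rfl⟩ := h
          have hq := ih (q / k) d' hd'
          have hdvd : k ∣ q := Int.dvd_of_emod_eq_zero h2
          have : k * (q / k) = q := Int.mul_ediv_cancel' hdvd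
          calc q = k * (q / k) := this.symm
            _ = k * k ^ d' := by rw [hq]
            _ = k ^ (d' + 1) := by ring
        · simp [h1, h2] at h

theorem pvPowExp_correct (k : Int) (hk : 2 ≤ k) : ∀ (d fuel : Nat), d < fuel →
    pvPowExp k fuel (k ^ d) = some d := by
  intro d
  induction d with
  | zero => intro fuel hf; obtain ⟨f, rfl⟩ := Nat.exists_eq_succ_of_ne_zero (by omega : fuel ≠ 0)
            simp [pvPowExp]
  | succ d ih =>
      intro fuel hf
      obtain ⟨f, rfl⟩ := Nat.exists_eq_succ_of_ne_zero (by omega : fuel ≠ 0)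
      have h2 : (2:Int) ≤ k ^ (d+1) := by
        calc (2:Int) = 2 ^ 1 := by norm_num
          _ ≤ 2 ^ (d+1) := by exact pow_le_pow_right₀ (by norm_num) (by omega)
          _ ≤ k ^ (d+1) := by exact pow_le_pow_left₀ (by norm_num) hk _
      have hne : k ^ (d+1) ≠ 1 := by omega
      have hdvd : k ∣ k ^ (d+1) := dvd_pow_self k (Nat.succ_ne_zero d)
      have hmod : k ^ (d+1) % k = 0 := Int.emod_eq_zero_of_dvd hdvd
      have hdiv : k ^ (d+1) / k = k ^ d := by
        have : k ^ (d+1) = k * k ^ d := by ring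
        rw [this, Int.mul_ediv_cancel_left _ (by omega : k ≠ 0)]
      unfold pvPowExp
      simp [hne, hmod, hdiv, ih f (by omega)]

-- A's loop from exponent d equals B's loop from value tau * k^d (same fuel, same steps)
theorem pvLoopA_eq_growB (n tau k : Int) : ∀ (fuel : Nat) (d : Nat),
    pvLoopA n tau k fuel d = pvGrowB n k fuel (tau * k ^ d) := by
  intro fuel
  induction fuel with
  | zero => intro d; simp [pvLoopA, pvGrowB]
  | succ f ih =>
      intro d
      unfold pvLoopA pvGrowB
      by_cases h : tau * k ^ d < n
      · simp [h, ih (d+1)]; congr 1; ring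
      · simp [h]

-- B's loop reaches exactly n when n = tau * k^(j+m) with enough fuel
theorem pvGrowB_reach (n tau k : Int) (htau : 1 ≤ tau) (hk : 2 ≤ k) :
    ∀ (m fuel j : Nat), m ≤ fuel → n = tau * k ^ (j + m) →
    pvGrowB n k fuel (tau * k ^ j) = n := by
  intro m
  induction m with
  | zero =>
      intro fuel j _ hn
      have hs : tau * k ^ j = n := by rw [hn, Nat.add_zero]
      cases fuel with
      | zero => simpa [pvGrowB] using hs
      | succ f => simp [pvGrowB, hs]
  | succ m ih =>
      intro fuel j hf hn
      obtain ⟨f, rfl⟩ := Nat.exists_eq_succ_of_ne_zero (by omega : fuel ≠ 0)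
      have hpow : k ^ j < k ^ (j + (m+1)) := by
        exact pow_lt_pow_right₀ (by omega : 1 < k) (by omega)
      have hlt : tau * k ^ j < n := by
        rw [hn]; exact mul_lt_mul_of_pos_left hpow (by omega)
      unfold pvGrowB
      have hstep : tau * k ^ j * k = tau * k ^ (j+1) := by ring
      rw [if_pos hlt, hstep]
      exact ih f (j+1) (by omega) (by rw [hn]; congr 2; omega)

-- if the float model fires at all, the input is in the overshoot region D_
theorem pvFloatEst_ne_zero (n tau k : Int) (htau : 1 ≤ tau)
    (h : pvFloatEst n tau k ≠ 0) : D_aligned_size n tau k := by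
  unfold pvFloatEst at h
  by_cases h1 : n % tau = 0
  · simp only [h1, if_pos rfl] at h
    cases hpe : pvPowExp k 64 (n / tau) with
    | none => simp [hpe] at h
    | some d =>
        simp only [hpe] at h
        by_cases hm : (k, d) ∈ pvOvershoot
        · have hq : n / tau = k ^ d := pvPowExp_complete k 64 (n / tau) d hpe
          have hdvd : tau ∣ n := Int.dvd_of_emod_eq_zero h1
          have hn : n = tau * (n / tau) := (Int.mul_ediv_cancel' hdvd).symm
          exact ⟨(k, d), hm, rfl, by rw [hn, hq]⟩
        · simp [hm] at h
  · simp [h1] at h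

-- if the input is in D_, the float model returns d + 1
theorem pvFloatEst_of_D (n tau k : Int) (htau : 1 ≤ tau) (hk : 2 ≤ k)
    (d : Nat) (hm : (k, d) ∈ pvOvershoot) (hn : n = tau * k ^ d) :
    pvFloatEst n tau k = d + 1 := by
  have hdvd : tau ∣ n := ⟨k ^ d, hn⟩
  have h1 : n % tau = 0 := Int.emod_eq_zero_of_dvd hdvd
  have hdiv : n / tau = k ^ d := by
    rw [hn, Int.mul_ediv_cancel_left _ (by omega : tau ≠ 0)]
  have hd63 : d ≤ 63 := (pvOvershoot_facts (k, d) hm).2.2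
  unfold pvFloatEst
  simp [h1, hdiv, pvPowExp_correct k hk d 64 (by omega), hm]

-- ===== VERDICT (by name: the statement is the Claim_ definition above) =====
theorem aligned_size_spec : Claim_unchanged_aligned_size := by
  intro n tau k _ hpre hnd
  obtain ⟨hn, htau, hk⟩ := hpre
  by_cases hle : n ≤ tau
  · simp [aligned_size, aligned_size_alt, hle, (by omega : ¬ n < 0),
          (by omega : ¬ tau < 1), (by omega : ¬ k < 2)]
  · have h0 : pvFloatEst n tau k = 0 := by
      by_contra h
      exact hnd (pvFloatEst_ne_zero n tau k htau h)
    simp only [aligned_size, aligned_size_alt, if_neg (by omega : ¬ n < 0),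
          if_neg (by omega : ¬ tau < 1), if_neg (by omega : ¬ k < 2), if_neg hle, h0]
    rw [pvLoopA_eq_growB]
    norm_num

theorem aligned_size_changed : Claim_changed_aligned_size := by
  unfold Claim_changed_aligned_size; decide

theorem aligned_size_tight : Claim_exact_aligned_size := by
  intro n tau k _ hpre hD
  obtain ⟨hn0, htau, hk'⟩ := hpre
  obtain ⟨p, hm, hpk, hn⟩ := hD
  obtain ⟨d, rfl⟩ : ∃ d, p = (k, d) := ⟨p.2, by rw [← hpk]⟩
  obtain ⟨hk2, hd2, hd63⟩ := pvOvershoot_facts (k, d) hm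
  simp only at hk2 hd2 hd63 hn
  have hk : 2 ≤ k := hk2
  have hpow2 : (4:Int) ≤ k ^ d := by
    calc (4:Int) = 2 ^ 2 := by norm_num
      _ ≤ 2 ^ d := pow_le_pow_right₀ (by norm_num) hd2
      _ ≤ k ^ d := pow_le_pow_left₀ (by norm_num) hk _
  have hgt : tau < n := by
    rw [hn]; nlinarith
  have hnpos : 0 < n := by omega
  -- A returns n * k
  have hA : aligned_size n tau k = n * k := by
    unfold aligned_size
    rw [if_neg (by omega), if_neg (by omega), if_neg (by omega), if_neg (by omega),
        pvFloatEst_of_D n tau k htau hk d hm hn]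
    have hns : tau * k ^ (d+1) = n * k := by rw [hn]; ring
    have hnot : ¬ tau * k ^ (d+1) < n := by rw [hns]; nlinarith
    show pvLoopA n tau k 64 (d+1) = n * k
    have h64 : (64:Nat) = 63 + 1 := rfl
    rw [h64]
    unfold pvLoopA
    rw [if_neg hnot, hns]
  -- B returns n
  have hB : aligned_size_alt n tau k = n := by
    unfold aligned_size_alt
    rw [if_neg (by omega), if_neg (by omega), if_neg (by omega), if_neg (by omega)]
    have := pvGrowB_reach n tau k htau hk d 64 0 (by omega) (by rw [hn]; norm_num)
    simpa using this
  rw [hA, hB]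
  nlinarith
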